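-- pv_equiv track=rewrite | github.com/scouvreur/hackerrank | problem_solving/data_structures/stacks/poisonous_plants.py | poisonous_plants_stack_based
-- ===== SOURCE A (Python) =====
-- from typing import List
--
-- def poisonous_plants_stack_based(plants: List[int]) -> int:
--     """
--     Stack-based implementation of poisonous plants.
--     """
--     # initialize values
--     max_days = 0
--
--     # an item in the stack will have the pesticide level and the days it survived
--     # stack = [[pesticide_level, days_survived], ...]
--     # example: stack = [[6, 0], [5, 0], ...]
--     stack: List[List[int]] = []
--
--     for plant in plants:
--         # current plant's survival days
--         days = 0
--
--         # top plant on the stack has pesticide level greater than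
--         # or equal to the current plant
--         while len(stack) > 0 and stack[-1][0] >= plant:
--             #  killed plant is to the right
--             killed_plant = stack.pop()
--             killed_plant_days_survived = killed_plant[1]
--             days = max(days, killed_plant_days_survived)
--
--         # if there are surviving plants to the left
--         if len(stack) > 0:
--             # current plant will die one day after the more
--             # poisonous plant to the left
--             days += 1
--
--         stack.append([plant, days])
--
--         # maximum survival time of any plant
--         max_days = max(max_days, days)
--
--     return max_days
-- ===== SOURCE B (Python) =====
-- from typing import List
--
-- def poisonous_plants_stack_based(plants: List[int]) -> int:
--     """
--     Naive day-by-day simulation: each day, every plant strictly greater than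
--     its current left neighbour dies simultaneously; count the days on which
--     at least one plant dies.
--     """
--     current = list(plants)
--     days = 0
--     while True:
--         survivors = [x for i, x in enumerate(current) if i == 0 or x <= current[i - 1]]
--         if survivors == current:
--             return days
--         current = survivors
--         days += 1
-- ===== Notes on version B (the rewrite author's own statement) =====
-- stated objective: alternative
-- what changed: Replaces the single-pass pesticide/days stack with a direct day-by-day simulation: each day keep exactly the plants not strictly greater than their current left neighbour and count the days on which some plant died.
import Mathlib
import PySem

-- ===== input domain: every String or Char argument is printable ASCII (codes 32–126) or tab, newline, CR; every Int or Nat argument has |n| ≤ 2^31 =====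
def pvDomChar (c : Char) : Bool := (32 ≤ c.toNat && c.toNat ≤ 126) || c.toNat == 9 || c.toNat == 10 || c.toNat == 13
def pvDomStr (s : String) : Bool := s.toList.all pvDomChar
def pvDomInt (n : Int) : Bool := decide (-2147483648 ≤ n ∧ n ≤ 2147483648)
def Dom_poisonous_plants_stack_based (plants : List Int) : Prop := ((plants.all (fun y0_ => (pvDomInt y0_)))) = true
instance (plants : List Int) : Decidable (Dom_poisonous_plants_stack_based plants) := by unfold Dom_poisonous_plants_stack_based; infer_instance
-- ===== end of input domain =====

-- B replaces A's single-pass pesticide/days stack by the naive day-by-day simulation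
-- (remove all plants strictly greater than their current left neighbour, simultaneously,
-- and count days with deaths); neither mutates its argument.

-- ===== PORT A =====
-- the inner `while len(stack) > 0 and stack[-1][0] >= plant: ...` loop;
-- the Python stack (append/pop at the right end) is encoded with its TOP as the list HEAD
def popLoopA (stack : List (Int × Int)) (plant : Int) (days : Int) :
    List (Int × Int) × Int :=
  match stack with
  | [] => ([], days)
  | (v, d) :: rest =>
      if plant ≤ v then popLoopA rest plant (max days d)   -- stack[-1][0] >= plant: pop, days = max(days, d)
      else ((v, d) :: rest, days)

-- one iteration of `for plant in plants`, state = (stack, max_days)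
def stepA (st : List (Int × Int) × Int) (plant : Int) : List (Int × Int) × Int :=
  let p := popLoopA st.1 plant 0
  let days := if p.1.isEmpty then p.2 else p.2 + 1        -- if len(stack) > 0: days += 1
  ((plant, days) :: p.1, max st.2 days)                   -- stack.append; max_days = max(max_days, days)

def poisonous_plants_stack_based (plants : List Int) : Int :=
  (plants.foldl stepA ([], 0)).2

-- ===== PORT B =====
-- the comprehension `[x for i, x in enumerate(current) if i == 0 or x <= current[i-1]]`,
-- ported as structural recursion carrying the previous element
def sieveB (prev : Int) (rest : List Int) : List Int :=
  match rest with
  | [] => []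
  | y :: r => if y ≤ prev then y :: sieveB y r else sieveB y r

def stepB (current : List Int) : List Int :=
  match current with
  | [] => []
  | h :: t => h :: sieveB h t

theorem sieveB_sublist (prev : Int) (rest : List Int) : (sieveB prev rest).Sublist rest := by
  induction rest generalizing prev with
  | nil => simp [sieveB]
  | cons y r ih =>
      simp only [sieveB]
      split
      · exact List.Sublist.cons₂ y (ih y)
      · exact List.Sublist.cons y (ih y)

theorem stepB_sublist (xs : List Int) : (stepB xs).Sublist xs := by
  cases xs with
  | nil => simp [stepB]
  | cons h t => exact List.Sublist.cons₂ h (sieveB_sublist h t)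

theorem stepB_lt_of_ne {xs : List Int} (h : stepB xs ≠ xs) :
    (stepB xs).length < xs.length := by
  rcases Nat.lt_or_ge (stepB xs).length xs.length with h1 | h1
  · exact h1
  · exact absurd ((stepB_sublist xs).eq_of_length_le h1) h

-- `while True:` loop of B, state = (current, days)
def simB (current : List Int) (days : Int) : Int :=
  let survivors := stepB current
  if survivors = current then days
  else simB survivors (days + 1)
termination_by current.length
decreasing_by exact stepB_lt_of_ne (by assumption)

def poisonous_plants_stack_based_alt (plants : List Int) : Int :=
  simB plants 0

-- ===== PRECONDITION & SPEC =====
def Spec_poisonous_plants_stack_based (plants : List Int) (out : Int) : Prop := out = poisonous_plants_stack_based_alt plants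
instance (plants : List Int) (out : Int) : Decidable (Spec_poisonous_plants_stack_based plants out) := by unfold Spec_poisonous_plants_stack_based; infer_instance

-- ===== CLAIM (what is proved, stated in full; the proofs are below) =====
def Claim_equal_poisonous_plants_stack_based : Prop := ∀ (plants : List Int), Dom_poisonous_plants_stack_based plants → Spec_poisonous_plants_stack_based plants (poisonous_plants_stack_based plants)

-- ===== LEMMAS AND PROOFS =====

-- A's fold state after a prefix
def SA (xs : List Int) : List (Int × Int) := (xs.foldl stepA ([], 0)).1
def MA (xs : List Int) : Int := (xs.foldl stepA ([], 0)).2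

-- truncated decrement: the days value one simulated day later
def dec1 (d : Int) : Int := max (d - 1) 0

def Tdec (e : Int × Int) : Int × Int := (e.1, dec1 e.2)

-- the stack one simulated day later: drop non-bottom entries whose plant dies on day 1
-- (days = 1), decrement the remaining days
def Tst : List (Int × Int) → List (Int × Int)
  | [] => []
  | [e] => [Tdec e]
  | e :: f :: rest => if 2 ≤ e.2 then Tdec e :: Tst (f :: rest) else Tst (f :: rest)

-- well-formed stacks of A: days ≥ 0, non-bottom days ≥ 1, values strictly decrease top→bottom
inductive GoodS : List (Int × Int) → Prop where
  | nil : GoodS []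
  | single (v d : Int) (hd : 0 ≤ d) : GoodS [(v, d)]
  | cons (v d : Int) (l : List (Int × Int)) (hd : 1 ≤ d) (hv : ∀ e ∈ l, e.1 < v)
      (hl : GoodS l) (hne : l ≠ []) : GoodS ((v, d) :: l)

-- the full induction invariant over prefixes
def InvA (xs : List Int) : Prop :=
  0 ≤ MA xs ∧
  GoodS (SA xs) ∧
  (∀ e ∈ SA xs, e.2 ≤ MA xs) ∧
  (SA xs).head?.map Prod.fst = xs.getLast? ∧
  SA (stepB xs) = Tst (SA xs) ∧
  MA (stepB xs) = dec1 (MA xs) ∧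
  (stepB xs = xs ↔ MA xs = 0) ∧
  (MA xs = 0 → SA xs = (xs.getLast?.map (fun v => (v, 0))).toList)

theorem dec1_max (a b : Int) : dec1 (max a b) = max (dec1 a) (dec1 b) := by
  simp only [dec1]; omega

theorem dec1_max_one {d : Int} (h : 0 ≤ d) : dec1 (max d 1) = dec1 d := by
  simp only [dec1]; omega

theorem Tst_cons (v d : Int) {l : List (Int × Int)} (h : l ≠ []) :
    Tst ((v, d) :: l) = if 2 ≤ d then Tdec (v, d) :: Tst l else Tst l := by
  cases l with
  | nil => exact absurd rfl h
  | cons f rest => rfl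

theorem Tst_nil_iff (l : List (Int × Int)) : Tst l = [] ↔ l = [] := by
  match l with
  | [] => simp [Tst]
  | [e] => simp [Tst]
  | e :: f :: rest =>
      rw [show Tst (e :: f :: rest) = if 2 ≤ e.2 then Tdec e :: Tst (f :: rest) else Tst (f :: rest) from rfl]
      constructor
      · intro h
        split at h
        · simp at h
        · exact absurd ((Tst_nil_iff (f :: rest)).1 h) (by simp)
      · intro h; simp at h

theorem Tst_val_mem {l : List (Int × Int)} {e : Int × Int} (h : e ∈ Tst l) :
    ∃ e' ∈ l, e.1 = e'.1 := by
  match l with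
  | [] => simp [Tst] at h
  | [f] =>
      simp [Tst, Tdec] at h
      exact ⟨f, by simp, by simp [h]⟩
  | f :: g :: rest =>
      rw [show Tst (f :: g :: rest) = if 2 ≤ f.2 then Tdec f :: Tst (g :: rest) else Tst (g :: rest) from rfl] at h
      split at h
      · rcases List.mem_cons.1 h with h | h
        · exact ⟨f, by simp, by simp [h, Tdec]⟩
        · rcases Tst_val_mem h with ⟨e', he', hv⟩
          exact ⟨e', List.mem_cons_of_mem _ he', hv⟩
      · rcases Tst_val_mem h with ⟨e', he', hv⟩
        exact ⟨e', List.mem_cons_of_mem _ he', hv⟩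

-- popLoopA facts
theorem popLoopA_stop {x a : Int} {m : List (Int × Int)} (h : ∀ e ∈ m, e.1 < x) :
    popLoopA m x a = (m, a) := by
  cases m with
  | nil => rfl
  | cons e rest =>
      obtain ⟨v, d⟩ := e
      have hv : v < x := h (v, d) (by simp)
      have : ¬ x ≤ v := by omega
      simp [popLoopA, this]

theorem popLoopA_acc_le (x : Int) (s : List (Int × Int)) (d : Int) :
    d ≤ (popLoopA s x d).2 := by
  induction s generalizing d with
  | nil => simp [popLoopA]
  | cons e rest ih =>
      obtain ⟨v, d'⟩ := e
      simp only [popLoopA]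
      split
      · exact le_trans (le_max_left _ _) (ih _)
      · simp

theorem popLoopA_rem_mem {x a : Int} {s : List (Int × Int)} :
    ∀ e ∈ (popLoopA s x a).1, e ∈ s := by
  induction s generalizing a with
  | nil => simp [popLoopA]
  | cons f rest ih =>
      obtain ⟨v, d⟩ := f
      simp only [popLoopA]
      split
      · intro e he; exact List.mem_cons_of_mem _ (ih e he)
      · intro e he; exact he

theorem popLoopA_rem_head {x a : Int} {s : List (Int × Int)} {v d : Int}
    {l : List (Int × Int)} (h : (popLoopA s x a).1 = (v, d) :: l) : v < x := by
  induction s generalizing a with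
  | nil => simp [popLoopA] at h
  | cons f rest ih =>
      obtain ⟨w, e⟩ := f
      simp only [popLoopA] at h
      split at h
      · exact ih h
      · rename_i hc
        obtain ⟨h1, _⟩ := Prod.mk.injEq .. ▸ (List.cons.injEq .. ▸ h).1
        omega

theorem popLoopA_good {x a : Int} {s : List (Int × Int)} (h : GoodS s) :
    GoodS (popLoopA s x a).1 := by
  induction h generalizing a with
  | nil => exact GoodS.nil
  | single v d hd =>
      simp only [popLoopA]
      split
      · exact GoodS.nil
      · exact GoodS.single v d hd
  | cons v d l hd hv hl hne ih =>
      simp only [popLoopA]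
      split
      · exact ih
      · exact GoodS.cons v d l hd hv hl hne

theorem goodS_head_lt {s : List (Int × Int)} (h : GoodS s) {x : Int}
    (hh : ∀ e ∈ s.head?, e.1 < x) : ∀ e ∈ s, e.1 < x := by
  cases h with
  | nil => simp
  | single v d _ =>
      intro e he; simp at he; subst he; exact hh _ (by simp)
  | cons v d l hd hv hl hne =>
      intro e he
      rcases List.mem_cons.1 he with he | he
      · subst he; exact hh _ (by simp)
      · exact lt_trans (hv e he) (hh (v, d) (by simp))

-- the crux: popping commutes with the one-day transform Tst
theorem popLoopA_T (x : Int) {s : List (Int × Int)} (hs : GoodS s) :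
    ∀ d : Int, 0 ≤ d →
      popLoopA (Tst s) x (dec1 d) = (Tst (popLoopA s x d).1, dec1 (popLoopA s x d).2) := by
  induction hs with
  | nil => intro d _; simp [Tst, popLoopA]
  | single v e he =>
      intro d hd
      by_cases hx : x ≤ v
      · simp [Tst, popLoopA, Tdec, hx, dec1_max]
      · simp [Tst, popLoopA, Tdec, hx]
  | cons v e l he hv hl hne ih =>
      intro d hd
      rw [Tst_cons v e hne]
      by_cases hx : x ≤ v
      · have hpop : popLoopA ((v, e) :: l) x d = popLoopA l x (max d e) := by
          simp [popLoopA, hx]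
        rw [hpop]
        by_cases h2 : 2 ≤ e
        · simp only [if_pos h2]
          have : popLoopA (Tdec (v, e) :: Tst l) x (dec1 d)
              = popLoopA (Tst l) x (max (dec1 d) (dec1 e)) := by
            simp [popLoopA, Tdec, hx]
          rw [this, ← dec1_max, ih (max d e) (by omega)]
        · simp only [if_neg h2]
          have hmax : dec1 (max d e) = dec1 d := by simp only [dec1]; omega
          rw [← hmax, ih (max d e) (by omega)]
      · have hpop : popLoopA ((v, e) :: l) x d = ((v, e) :: l, d) := by
          simp [popLoopA, hx]
        rw [hpop, Tst_cons v e hne]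
        by_cases h2 : 2 ≤ e
        · simp only [if_pos h2]
          simp [popLoopA, Tdec, hx]
        · simp only [if_neg h2]
          refine popLoopA_stop ?_
          intro f hf
          rcases Tst_val_mem hf with ⟨e', he', hfe⟩
          have := hv e' he'
          omega

theorem popLoopA_one {x v e : Int} {l : List (Int × Int)}
    (h : GoodS ((v, e) :: l)) (hx : x ≤ v) (d : Int)
    (hne : (popLoopA ((v, e) :: l) x d).1 ≠ []) :
    1 ≤ (popLoopA ((v, e) :: l) x d).2 := by
  cases h with
  | single _ _ he =>
      exfalso
      simp [popLoopA, hx] at hne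
  | cons _ _ _ he hv hl hln =>
      have : popLoopA ((v, e) :: l) x d = popLoopA l x (max d e) := by
        simp [popLoopA, hx]
      rw [this]
      have := popLoopA_acc_le x l (max d e)
      omega

-- stepB on a snoc
theorem sieveB_snoc (p x : Int) (t : List Int) :
    sieveB p (t ++ [x]) =
      sieveB p t ++ (if x ≤ (p :: t).getLast (by simp) then [x] else []) := by
  induction t generalizing p with
  | nil => simp [sieveB]
  | cons y r ih =>
      simp only [List.cons_append, sieveB]
      rw [ih y]
      have : (p :: y :: r).getLast (by simp) = (y :: r).getLast (by simp) := by
        simp [List.getLast_cons]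
      rw [this]
      split <;> simp

theorem stepB_snoc (x : Int) {xs : List Int} (h : xs ≠ []) :
    stepB (xs ++ [x]) =
      stepB xs ++ (if x ≤ xs.getLast h then [x] else []) := by
  cases xs with
  | nil => exact absurd rfl h
  | cons hh t =>
      simp only [List.cons_append, stepB]
      rw [sieveB_snoc hh x t]

theorem stepB_length_le (xs : List Int) : (stepB xs).length ≤ xs.length :=
  (stepB_sublist xs).length_le

-- folding one more element
theorem SA_snoc (xs : List Int) (x : Int) :
    SA (xs ++ [x]) = (stepA (SA xs, MA xs) x).1 := by
  simp [SA, MA, List.foldl_append]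

theorem MA_snoc (xs : List Int) (x : Int) :
    MA (xs ++ [x]) = (stepA (SA xs, MA xs) x).2 := by
  simp [SA, MA, List.foldl_append]

theorem stepA_eval (s : List (Int × Int)) (m x : Int) :
    stepA (s, m) x =
      ((x, if (popLoopA s x 0).1.isEmpty then (popLoopA s x 0).2 else (popLoopA s x 0).2 + 1)
          :: (popLoopA s x 0).1,
        max m (if (popLoopA s x 0).1.isEmpty then (popLoopA s x 0).2 else (popLoopA s x 0).2 + 1)) :=
  rfl

-- the invariant holds for every prefix
theorem invA_all (xs : List Int) : InvA xs := by
  induction xs using List.reverseRecOn with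
  | nil =>
      refine ⟨le_rfl, GoodS.nil, ?_, ?_, ?_, ?_, ?_, ?_⟩ <;>
        simp [SA, MA, stepB, Tst, dec1]
  | append_singleton xs x ih =>
      obtain ⟨h0, hGood, hle, hhead, hT, hMT, hfix, hzero⟩ := ih
      by_cases hxs : xs = []
      · subst hxs
        refine ⟨le_rfl, ?_, ?_, ?_, ?_, ?_, ?_, ?_⟩ <;>
          simp [SA, MA, stepA, popLoopA, stepB, sieveB, Tst, Tdec, dec1]
        exact GoodS.single x 0 le_rfl
      · -- xs nonempty: its last element is the top of the stack
        cases hS : SA xs with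
        | nil =>
            exfalso
            rw [hS] at hhead
            simp only [List.head?_nil, Option.map_none] at hhead
            exact hxs (List.getLast?_eq_none_iff.mp hhead.symm)
        | cons e0 s' =>
        obtain ⟨v0, d0⟩ := e0
        have hgl : xs.getLast? = some v0 := by
          rw [hS] at hhead; simpa using hhead.symm
        have hglv : xs.getLast hxs = v0 := by
          have h1 := List.getLast?_eq_some_getLast hxs
          rw [hgl] at h1
          injection h1 with h1
          exact h1.symm
        have hq : ∃ s1 M0, popLoopA (SA xs) x 0 = (s1, M0) := ⟨_, _, rfl⟩
        obtain ⟨s1, M0, hq⟩ := hq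
        have hM0 : 0 ≤ M0 := by
          have := popLoopA_acc_le x (SA xs) 0
          rw [hq] at this; exact this
        have eSA : SA (xs ++ [x]) = (x, if s1.isEmpty then M0 else M0 + 1) :: s1 := by
          rw [SA_snoc, stepA_eval, hq]
        have eMA : MA (xs ++ [x]) = max (MA xs) (if s1.isEmpty then M0 else M0 + 1) := by
          rw [MA_snoc, stepA_eval, hq]
        have hglx : (xs ++ [x]).getLast? = some x := by simp
        by_cases hx : x ≤ v0
        · -- case B: the new plant is not bigger than the last one; it survives day 1
          have hsB : stepB (xs ++ [x]) = stepB xs ++ [x] := by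
            rw [stepB_snoc x hxs, hglv, if_pos hx]
          have hTpop : popLoopA (Tst (SA xs)) x 0 = (Tst s1, dec1 M0) := by
            have h00 : dec1 0 = 0 := by simp [dec1]
            have := popLoopA_T x hGood 0 le_rfl
            rw [h00, hq] at this; exact this
          -- the new days value, on both sides
          by_cases hs1 : s1 = []
          · -- the whole stack is popped: the new plant never dies
            have hdays : (if s1.isEmpty then M0 else M0 + 1) = M0 := by simp [hs1]
            have hMz : MA xs = 0 → s1 = [] ∧ M0 = 0 := by
              intro hma
              have h8 := hzero hma
              rw [hgl] at h8
              simp only [Option.map_some, Option.toList_some] at h8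
              rw [hS] at h8
              simp only [List.cons.injEq, Prod.mk.injEq, true_and] at h8
              obtain ⟨hd0, hs'⟩ := h8
              rw [hS, hd0, hs'] at hq
              have hq2 : ([] : List (Int × Int)) = s1 ∧ (0 : Int) = M0 := by
                simpa [popLoopA, hx] using hq
              exact ⟨hq2.1.symm, hq2.2.symm⟩
            have eSB : SA (stepB (xs ++ [x])) = [(x, dec1 M0)] := by
              rw [hsB, SA_snoc, stepA_eval, hT, hTpop]
              simp [hs1, Tst]
            refine ⟨?_, ?_, ?_, ?_, ?_, ?_, ?_, ?_⟩
            · rw [eMA]; omega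
            · rw [eSA, hdays, hs1]; exact GoodS.single x M0 hM0
            · intro e he
              rw [eSA, hdays, hs1] at he
              simp at he
              subst he
              rw [eMA, hdays]
              exact le_max_right _ _
            · rw [eSA, hglx]; simp
            · rw [eSB, eSA, hdays, hs1, Tst, Tdec]
            · rw [hsB, MA_snoc, stepA_eval, hT, hMT, hTpop, eMA, hdays]
              simp only [Tst, List.isEmpty_nil, if_true, hs1]
              rw [dec1_max]
            · rw [eMA, hdays, hsB]
              constructor
              · intro h
                have h' : stepB xs = xs := List.append_cancel_right h
                have hma := hfix.1 h'
                have := hMz hma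
                omega
              · intro h
                have hma : MA xs = 0 := by omega
                rw [hfix.2 hma]
            · intro h
              rw [eMA] at h
              have hma : MA xs = 0 := by omega
              obtain ⟨-, hM0z⟩ := hMz hma
              rw [eSA, hdays, hs1, hM0z, hglx]
              simp
          · -- some plant survives below: the new plant dies after M0 + 1 days
            have hdays : (if s1.isEmpty then M0 else M0 + 1) = M0 + 1 := by simp [hs1]
            have hM1 : 1 ≤ M0 := by
              have hne' : (popLoopA ((v0, d0) :: s') x 0).1 ≠ [] := by
                rw [← hS, hq]; exact hs1
              have := popLoopA_one (hS ▸ hGood) hx 0 hne'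
              rw [← hS, hq] at this; exact this
            have hGs1 : GoodS s1 := by
              have := popLoopA_good (x := x) (a := 0) hGood
              rw [hq] at this; exact this
            have hs1lt : ∀ e ∈ s1, e.1 < x := by
              refine goodS_head_lt hGs1 ?_
              intro e he
              cases h1 : s1 with
              | nil => simp [h1] at he
              | cons f l1 =>
                  obtain ⟨vf, df⟩ := f
                  have : vf < x := popLoopA_rem_head (x := x) (a := 0) (s := SA xs) (by rw [hq, h1])
                  rw [h1] at he; simp at he
                  rw [← he]; exact this
            have hTne : Tst s1 ≠ [] := fun h => hs1 ((Tst_nil_iff s1).1 h)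
            have eSB : SA (stepB (xs ++ [x])) = (x, dec1 M0 + 1) :: Tst s1 := by
              rw [hsB, SA_snoc, stepA_eval, hT, hTpop]
              simp [List.isEmpty_iff, hTne]
            refine ⟨?_, ?_, ?_, ?_, ?_, ?_, ?_, ?_⟩
            · rw [eMA]; omega
            · rw [eSA, hdays]
              exact GoodS.cons x (M0 + 1) s1 (by omega) hs1lt hGs1 hs1
            · intro e he
              rw [eSA, hdays] at he
              rw [eMA, hdays]
              rcases List.mem_cons.1 he with he | he
              · rw [he]; exact le_max_right _ _
              · have h1 : e ∈ SA xs := by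
                  have := popLoopA_rem_mem (x := x) (a := 0) (s := SA xs)
                  rw [hq] at this; exact this e he
                exact le_trans (hle e h1) (le_max_left _ _)
            · rw [eSA, hglx]; simp
            · rw [eSB, eSA, hdays, Tst_cons x (M0 + 1) hs1]
              rw [if_pos (by omega : (2:Int) ≤ M0 + 1)]
              simp only [Tdec]
              have : dec1 (M0 + 1) = dec1 M0 + 1 := by simp only [dec1]; omega
              rw [this]
            · rw [hsB, MA_snoc, stepA_eval, hT, hMT, hTpop, eMA, hdays]
              simp only [List.isEmpty_iff, if_neg hTne]
              rw [dec1_max]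
              have : dec1 (M0 + 1) = dec1 M0 + 1 := by simp only [dec1]; omega
              rw [this]
            · rw [eMA, hdays, hsB]
              constructor
              · intro h
                have h' : stepB xs = xs := List.append_cancel_right h
                have hma := hfix.1 h'
                have h8 := hzero hma
                rw [hgl] at h8
                simp only [Option.map_some, Option.toList_some] at h8
                rw [hS] at h8
                simp only [List.cons.injEq, Prod.mk.injEq, true_and] at h8
                obtain ⟨hd0, hs'⟩ := h8
                rw [hS, hd0, hs'] at hq
                have hq2 : ([] : List (Int × Int)) = s1 ∧ (0 : Int) = M0 := by
                  simpa [popLoopA, hx] using hq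
                exact absurd hq2.1.symm hs1
              · intro h; omega
            · intro h
              rw [eMA, hdays] at h
              omega
        · -- case A: the new plant is strictly bigger than the last one; it dies on day 1
          have hx' : v0 < x := by omega
          have hqA : s1 = SA xs ∧ M0 = 0 := by
            rw [hS] at hq
            simp [popLoopA, hx] at hq
            exact ⟨by rw [hS, ← hq.1], hq.2.symm⟩
          have hs1ne : s1 ≠ [] := by rw [hqA.1, hS]; simp
          have hdays : (if s1.isEmpty then M0 else M0 + 1) = 1 := by
            simp [List.isEmpty_iff, hs1ne, hqA.2]
          have hsB : stepB (xs ++ [x]) = stepB xs := by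
            rw [stepB_snoc x hxs, hglv, if_neg hx]
            simp
          refine ⟨?_, ?_, ?_, ?_, ?_, ?_, ?_, ?_⟩
          · rw [eMA]; have := le_max_right (MA xs) (if s1.isEmpty then M0 else M0 + 1)
            rw [hdays] at this; omega
          · rw [eSA, hdays, hqA.1]
            refine GoodS.cons x 1 (SA xs) le_rfl ?_ hGood (by rw [hS]; simp)
            refine goodS_head_lt hGood ?_
            intro e he
            rw [hS] at he; simp at he
            rw [← he]; exact hx'
          · intro e he
            rw [eSA, hdays, hqA.1] at he
            rw [eMA, hdays]
            rcases List.mem_cons.1 he with he | he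
            · rw [he]; exact le_max_right _ _
            · exact le_trans (hle e he) (le_max_left _ _)
          · rw [eSA, hglx]; simp
          · rw [hsB, hT, eSA, hdays, hqA.1, Tst_cons x 1 (by rw [hS]; simp)]
            rw [if_neg (by omega : ¬ (2:Int) ≤ 1)]
          · rw [hsB, hMT, eMA, hdays, dec1_max_one h0]
          · rw [eMA, hdays]
            constructor
            · intro h
              exfalso
              have hlen := congrArg List.length h
              rw [hsB] at hlen
              have := stepB_length_le xs
              simp at hlen
              omega
            · intro h
              exfalso
              have := le_max_right (MA xs) (1 : Int)
              omega
          · intro h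
            exfalso
            rw [eMA, hdays] at h
            have := le_max_right (MA xs) (1 : Int)
            omega

-- simulation counts MA
theorem simB_eq_MA (xs : List Int) : ∀ d : Int, simB xs d = d + MA xs := by
  have H : ∀ (n : Nat) (ys : List Int), ys.length ≤ n → ∀ d : Int, simB ys d = d + MA ys := by
    intro n
    induction n with
    | zero =>
        intro ys hy d
        have hys : ys = [] := List.eq_nil_of_length_eq_zero (Nat.le_zero.1 hy)
        subst hys
        rw [simB]
        simp [stepB, MA]
    | succ n ihn =>
        intro ys hy d
        obtain ⟨h0, -, -, -, -, hMT, hfix, -⟩ := invA_all ys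
        by_cases h : stepB ys = ys
        · have hma := hfix.1 h
          rw [simB]
          simp [h, hma]
        · have hlt : (stepB ys).length < ys.length := stepB_lt_of_ne h
          rw [simB]
          simp only [h, if_false]
          have hle' : (stepB ys).length ≤ n := by omega
          rw [ihn (stepB ys) hle' (d + 1), hMT]
          have hnz : MA ys ≠ 0 := fun hz => h (hfix.2 hz)
          have hd : dec1 (MA ys) = MA ys - 1 := by
            simp only [dec1]; omega
          rw [hd]
          omega
  intro d
  exact H xs.length xs le_rfl d

-- ===== VERDICT (by name: the statement is the Claim_ definition above) =====
theorem poisonous_plants_stack_based_spec : Claim_equal_poisonous_plants_stack_based := by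
  intro plants _
  show poisonous_plants_stack_based plants = poisonous_plants_stack_based_alt plants
  have h := simB_eq_MA plants 0
  simp only [poisonous_plants_stack_based, poisonous_plants_stack_based_alt, h]
  simp [MA]
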